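-- pv_equiv track=rewrite | github.com/jano31415/codejam | kickstart/k2021_a/b.py | solve
-- ===== SOURCE A (Python) =====
-- def solve(R,C,grid):
--     totl = 0
--     rowl = [[0]*C for _ in range(R)]
--     rowr = [[0]*C for _ in range(R)]
--
--     for ri, row in enumerate(grid):
--         rowr_tmp = 0
--         for ci, c in enumerate(row):
--             if c == 1:
--                 rowr_tmp +=1
--             else:
--                 rowr_tmp = 0
--             if rowr_tmp > 1:
--                 # initialize rowl as grid (saving some end of grid checks)
--                 # and then rowr_tmp is
--                 # rowl[ri][ci-1] so we dont need the tmp variable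
--                 # if we dont use the tmp variable we can also fill
--                 # coll (top) by using coll[ri-1][ci]!
--                 rowl[ri][ci] = rowr_tmp
--
--         rowr_tmp = 0
--         for ci in reversed(range(C)):
--             c = row[ci]
--             if c == 1:
--                 rowr_tmp += 1
--             else:
--                 rowr_tmp = 0
--             if rowr_tmp > 1:
--                 rowr[ri][ci] = rowr_tmp
--
--     coll = [[0] * C for _ in range(R)]
--     colr = [[0] * C for _ in range(R)]
--     for c in range(C):
--         colr_tmp = 0
--         for r in range(R):
--             if grid[r][c] == 1:
--                 colr_tmp += 1
--             else:
--                 colr_tmp = 0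
--             if colr_tmp > 1:
--                 coll[r][c] = colr_tmp
--         colr_tmp = 0
--         for r in reversed(range(R)):
--             if grid[r][c] == 1:
--                 colr_tmp += 1
--             else:
--                 colr_tmp = 0
--             if colr_tmp > 1:
--                 colr[r][c] = colr_tmp
--
--     for ri,row in enumerate(grid):
--         for ci,c in enumerate(row):
--             if c != 1:
--                 continue
--             totl += get_l(rowl[ri][ci], coll[ri][ci])
--             totl += get_l(rowr[ri][ci], coll[ri][ci])
--             totl += get_l(rowr[ri][ci], colr[ri][ci])
--             totl += get_l(rowl[ri][ci], colr[ri][ci])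
--     return totl
--
-- def get_l(a,b):
--     if min(a,b) < 2:
--         return 0
--     # a is max: min(a//2, b) - 1, by symmetry:
--     # we can micro optimize to .. -2
--     return min(a//2, b) - 1 + min(a,b//2) - 1
-- ===== SOURCE B (Python) =====
-- def get_l(a, b):
--     if min(a, b) < 2:
--         return 0
--     return min(a // 2, b) - 1 + min(a, b // 2) - 1
--
--
-- def solve(R, C, grid):
--     # Per-cell outward arm scans over the declared R x C window;
--     # no precomputed run-length tables.
--     tot = 0
--     for ri in range(R):
--         for ci in range(C):
--             if grid[ri][ci] != 1:
--                 continue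
--             l = 0
--             j = ci
--             while j >= 0 and grid[ri][j] == 1:
--                 l += 1
--                 j -= 1
--             r = 0
--             j = ci
--             while j < C and grid[ri][j] == 1:
--                 r += 1
--                 j += 1
--             u = 0
--             j = ri
--             while j >= 0 and grid[j][ci] == 1:
--                 u += 1
--                 j -= 1
--             d = 0
--             j = ri
--             while j < R and grid[j][ci] == 1:
--                 d += 1
--                 j += 1
--             tot += get_l(l, u) + get_l(r, u) + get_l(r, d) + get_l(l, d)
--     return tot
-- ===== Notes on version B (the rewrite author's own statement) =====
-- stated objective: simpler
-- what changed: B drops the four precomputed run-length tables (rowl/rowr/coll/colr) and instead, for each 1-cell, scans outward in the four directions to get the arm lengths directly, feeding them to the unchanged get_l helper.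
import Mathlib
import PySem

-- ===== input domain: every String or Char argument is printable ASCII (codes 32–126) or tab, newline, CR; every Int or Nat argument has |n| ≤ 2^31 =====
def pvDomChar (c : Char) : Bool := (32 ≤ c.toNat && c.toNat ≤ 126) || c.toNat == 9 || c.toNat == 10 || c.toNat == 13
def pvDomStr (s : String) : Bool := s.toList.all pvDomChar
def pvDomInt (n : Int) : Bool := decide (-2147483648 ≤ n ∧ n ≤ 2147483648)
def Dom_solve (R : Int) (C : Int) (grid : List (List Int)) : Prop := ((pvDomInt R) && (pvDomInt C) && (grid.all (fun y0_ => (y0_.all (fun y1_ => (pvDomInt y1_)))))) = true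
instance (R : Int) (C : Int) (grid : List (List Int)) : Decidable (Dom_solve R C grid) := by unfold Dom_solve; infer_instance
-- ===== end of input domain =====

-- B replaces A's four precomputed run-length tables by per-cell outward arm scans
-- (simpler decomposition; same return value wherever A returns).

-- ===== PORT A =====
-- get_l, verbatim
def get_l (a : Int) (b : Int) : Int :=
  if min a b < 2 then 0
  else min (PySem.Int.floordiv a 2) b - 1 + min a (PySem.Int.floordiv b 2) - 1

-- one table-filling loop of A: carries the running tmp, emits the stored entry
-- (0 when tmp ≤ 1, matching the zero-initialized matrix cell that is never written)
def scanGo (tmp : Int) : List Int → List Int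
  | [] => []
  | c :: rest =>
      let t := if c = 1 then tmp + 1 else 0
      (if t > 1 then t else 0) :: scanGo t rest

-- column c read top to bottom: grid[r][c] for r in range(R) (the loop reads exactly
-- the first R rows; under Pre_ those rows exist and extend past column c)
def colList (R' : Nat) (grid : List (List Int)) (c : Nat) : List Int :=
  (grid.take R').map (fun row => row.getD c 0)

def solve (R : Int) (C : Int) (grid : List (List Int)) : Int :=
  -- rowl: the forward loop over each whole row (enumerate(row));
  -- rowr: the reversed(range(C)) loop, i.e. the same scan over the reversed first C
  --       entries of the row, entries prepended in write order;
  -- coll/colr: the column loops over r in range(R), stored column-major (the loop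
  --       fills one column per step of c); they are read back transposed below
  let rowl := grid.map (fun row => scanGo 0 row)
  let rowr := grid.map (fun row => (scanGo 0 (row.take C.toNat).reverse).reverse)
  let coll := (List.range C.toNat).map (fun c => scanGo 0 (colList R.toNat grid c))
  let colr := (List.range C.toNat).map (fun c => (scanGo 0 (colList R.toNat grid c).reverse).reverse)
  (PySem.List.enumerate grid).foldl (fun totl p =>
    (PySem.List.enumerate p.2).foldl (fun totl q =>
      if q.2 ≠ 1 then totl
      else
        let rl := PySem.List.pyGetD (PySem.List.pyGetD rowl p.1 []) q.1 0
        let rr := PySem.List.pyGetD (PySem.List.pyGetD rowr p.1 []) q.1 0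
        let cl := PySem.List.pyGetD (PySem.List.pyGetD coll q.1 []) p.1 0
        let cr := PySem.List.pyGetD (PySem.List.pyGetD colr q.1 []) p.1 0
        totl + get_l rl cl + get_l rr cl + get_l rr cr + get_l rl cr) totl) 0

-- ===== PORT B =====
-- while j >= 0 and row[j] == 1: l += 1; j -= 1   (structural recursion on the index)
def armLeftNat (xs : List Int) : Nat → Int
  | 0 => if xs.getD 0 0 = 1 then 1 else 0
  | j + 1 => if xs.getD (j + 1) 0 = 1 then 1 + armLeftNat xs j else 0

-- while j < C and row[j] == 1: r += 1; j += 1   (fuel = number of indices left below C)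
def armRightGo (xs : List Int) : Nat → Nat → Int
  | 0, _ => 0
  | fuel + 1, j => if xs.getD j 0 = 1 then 1 + armRightGo xs fuel (j + 1) else 0

-- while j >= 0 and grid[j][ci] == 1: u += 1; j -= 1
def armUpNat (grid : List (List Int)) (ci : Nat) : Nat → Int
  | 0 => if (grid.getD 0 []).getD ci 0 = 1 then 1 else 0
  | j + 1 => if ((grid.getD (j + 1) []).getD ci 0) = 1 then 1 + armUpNat grid ci j else 0

-- while j < R and grid[j][ci] == 1: d += 1; j += 1
def armDownGo (grid : List (List Int)) (ci : Nat) : Nat → Nat → Int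
  | 0, _ => 0
  | fuel + 1, j => if ((grid.getD j []).getD ci 0) = 1 then 1 + armDownGo grid ci fuel (j + 1) else 0

def solve_alt (R : Int) (C : Int) (grid : List (List Int)) : Int :=
  (PySem.List.pyRange 0 R 1).foldl (fun tot ri =>
    (PySem.List.pyRange 0 C 1).foldl (fun tot ci =>
      if PySem.List.pyGetD (PySem.List.pyGetD grid ri []) ci 0 ≠ 1 then tot
      else
        let l := armLeftNat (PySem.List.pyGetD grid ri []) ci.toNat
        let r := armRightGo (PySem.List.pyGetD grid ri []) (C - ci).toNat ci.toNat
        let u := armUpNat grid ci.toNat ri.toNat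
        let d := armDownGo grid ci.toNat (R - ri).toNat ri.toNat
        tot + get_l l u + get_l r u + get_l r d + get_l l d) tot) 0

-- ===== PRECONDITION & SPEC =====
-- Exactly the inputs on which A returns normally: every row must reach column C
-- (the reversed(range(C)) loop reads row[C-1..0]), the first R rows must exist when
-- both dimensions are positive (the column loops read grid[R-1..0]), and every cell
-- equal to 1 must lie inside the R×C window (the final loop indexes the R×C tables
-- at every 1-cell).  Anywhere else A raises IndexError.
def Pre_solve (R : Int) (C : Int) (grid : List (List Int)) : Prop :=
  (0 < C → ∀ row ∈ grid, C ≤ (row.length : Int)) ∧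
  (0 < R → 0 < C → R ≤ (grid.length : Int)) ∧
  (∀ p ∈ PySem.List.enumerate grid, ∀ q ∈ PySem.List.enumerate p.2,
    q.2 = 1 → p.1 < R ∧ q.1 < C)
instance (R : Int) (C : Int) (grid : List (List Int)) : Decidable (Pre_solve R C grid) := by
  unfold Pre_solve; infer_instance

def pvWitness_solve : Int × Int × List (List Int) := (2, 3, [[1, 1, 1], [0, 1, 0]])

def Spec_solve (R : Int) (C : Int) (grid : List (List Int)) (out : Int) : Prop := out = solve_alt R C grid
instance (R : Int) (C : Int) (grid : List (List Int)) (out : Int) : Decidable (Spec_solve R C grid out) := by unfold Spec_solve; infer_instance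

-- ===== CLAIM (what is proved, stated in full; the proofs are below) =====
def Claim_equal_solve : Prop := ∀ (R : Int) (C : Int) (grid : List (List Int)), Dom_solve R C grid → Pre_solve R C grid → Spec_solve R C grid (solve R C grid)

-- ===== LEMMAS AND PROOFS =====

-- the run length of 1s ending at index i, with carried-in prefix t
def runAux (t : Int) : List Int → Nat → Int
  | [], _ => 0
  | c :: _, 0 => if c = 1 then t + 1 else 0
  | c :: rest, i + 1 => runAux (if c = 1 then t + 1 else 0) rest i

theorem scanGo_length (t : Int) (xs : List Int) : (scanGo t xs).length = xs.length := by
  induction xs generalizing t with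
  | nil => rfl
  | cons c rest ih => simp [scanGo, ih]

theorem scanGo_getD (t : Int) (xs : List Int) (i : Nat) :
    (scanGo t xs).getD i 0 = (if runAux t xs i > 1 then runAux t xs i else 0) := by
  induction xs generalizing t i with
  | nil => simp [scanGo, runAux]
  | cons c rest ih =>
      cases i with
      | zero => simp [scanGo, runAux]
      | succ j => simpa [scanGo, runAux] using ih _ j

theorem runAux_succ (xs : List Int) (t : Int) (i : Nat) :
    runAux t xs (i + 1) = (if xs.getD (i + 1) 0 = 1 then runAux t xs i + 1 else 0) := by
  induction xs generalizing t i with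
  | nil => simp [runAux]
  | cons c rest ih =>
      cases i with
      | zero =>
          cases rest with
          | nil => simp [runAux]
          | cons d r2 => by_cases hd : d = 1 <;> simp [runAux, hd]
      | succ j => simpa [runAux] using ih _ j

theorem armLeftNat_eq_runAux (xs : List Int) (i : Nat) :
    armLeftNat xs i = runAux 0 xs i := by
  induction i with
  | zero =>
      cases xs with
      | nil => simp [armLeftNat, runAux]
      | cons c rest => simp [armLeftNat, runAux]
  | succ j ih =>
      rw [armLeftNat, runAux_succ, ih]
      by_cases h : xs.getD (j + 1) 0 = 1
      · rw [if_pos h, if_pos h]; omega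
      · rw [if_neg h, if_neg h]

theorem armLeftNat_zero_of_ne (xs : List Int) (i : Nat) (h : xs.getD i 0 ≠ 1) :
    armLeftNat xs i = 0 := by
  cases i <;> rw [armLeftNat, if_neg h]

theorem reverse_getD_of_lt {xs : List Int} {i : Nat} (h : i < xs.length) :
    xs.reverse.getD i 0 = xs.getD (xs.length - 1 - i) 0 := by
  have h' : i < xs.reverse.length := by simpa using h
  rw [List.getD_eq_getElem _ _ h', List.getD_eq_getElem _ _ (by omega)]
  simp [List.getElem_reverse]

theorem armRightGo_eq (xs : List Int) (j : Nat) (hj : j < xs.length) :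
    armRightGo xs (xs.length - j) j = armLeftNat xs.reverse (xs.length - 1 - j) := by
  generalize hf : xs.length - j = fuel
  induction fuel generalizing j with
  | zero => omega
  | succ f ih =>
      have hrev : xs.reverse.getD (xs.length - 1 - j) 0 = xs.getD j 0 := by
        rw [reverse_getD_of_lt (by omega)]
        congr 1; omega
      rw [armRightGo]
      by_cases h1 : xs.getD j 0 = 1
      · rw [if_pos h1]
        by_cases hlast : j + 1 < xs.length
        · have hidx : xs.length - 1 - j = (xs.length - 1 - (j + 1)) + 1 := by omega
          rw [hidx, armLeftNat, ← hidx, hrev, if_pos h1,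
            ih (j + 1) hlast (by omega)]
        · have hf0 : f = 0 := by omega
          have hidx0 : xs.length - 1 - j = 0 := by omega
          rw [hf0, hidx0, armLeftNat]
          rw [hidx0] at hrev
          rw [hrev, if_pos h1, armRightGo]
          norm_num
      · rw [if_neg h1, armLeftNat_zero_of_ne _ _ (by rw [hrev]; exact h1)]

theorem getD_take (xs : List Int) (m j : Nat) (h : j < m) :
    (xs.take m).getD j 0 = xs.getD j 0 := by
  by_cases hN : j < xs.length
  · rw [List.getD_eq_getElem _ _ (by simp; omega), List.getD_eq_getElem _ _ hN]
    simp
  · rw [List.getD_eq_default _ _ (by simp; omega), List.getD_eq_default _ _ (by omega)]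

theorem armRightGo_take (xs : List Int) (m : Nat) :
    ∀ (fuel j : Nat), j + fuel ≤ m → armRightGo (xs.take m) fuel j = armRightGo xs fuel j := by
  intro fuel
  induction fuel with
  | zero => intro j _; rfl
  | succ f ih =>
      intro j hj
      rw [armRightGo, armRightGo, getD_take _ _ _ (by omega), ih (j + 1) (by omega)]

theorem colList_getD (R' : Nat) (grid : List (List Int)) (c j : Nat) (hj : j < R') :
    (colList R' grid c).getD j 0 = (grid.getD j []).getD c 0 := by
  by_cases hN : j < grid.length
  · rw [List.getD_eq_getElem _ _ (by simp [colList]; omega), List.getD_eq_getElem _ _ hN]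
    simp [colList]
  · rw [List.getD_eq_default _ _ (by simp [colList]; omega),
      show grid.getD j [] = [] from List.getD_eq_default _ _ (by omega)]
    simp

theorem armUpNat_take (R' : Nat) (grid : List (List Int)) (ci : Nat) :
    ∀ j : Nat, j < R' → armUpNat grid ci j = armLeftNat (colList R' grid ci) j := by
  intro j
  induction j with
  | zero => intro h0; rw [armUpNat, armLeftNat, colList_getD _ _ _ _ h0]
  | succ k ih =>
      intro hk
      rw [armUpNat, armLeftNat, colList_getD _ _ _ _ hk, ih (by omega)]

theorem armDownGo_take (R' : Nat) (grid : List (List Int)) (ci : Nat) :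
    ∀ (fuel j : Nat), j + fuel ≤ R' →
      armDownGo grid ci fuel j = armRightGo (colList R' grid ci) fuel j := by
  intro fuel
  induction fuel with
  | zero => intro j _; rfl
  | succ f ih =>
      intro j hj
      rw [armDownGo, armRightGo, colList_getD _ _ _ _ (by omega), ih (j + 1) (by omega)]

theorem get_l_trunc_left (a b : Int) :
    get_l (if a > 1 then a else 0) b = get_l a b := by
  by_cases h : a > 1
  · rw [if_pos h]
  · rw [if_neg h]
    unfold get_l
    rw [if_pos (by omega), if_pos (by omega)]

theorem get_l_trunc_right (a b : Int) :
    get_l a (if b > 1 then b else 0) = get_l a b := by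
  by_cases h : b > 1
  · rw [if_pos h]
  · rw [if_neg h]
    unfold get_l
    rw [if_pos (by omega), if_pos (by omega)]

theorem range_map_getD {α : Type} (n : Nat) (f : Nat → α) (i : Nat) (hi : i < n) (d : α) :
    (((List.range n).map f).getD i d) = f i := by
  rw [List.getD_eq_getElem _ _ (by simpa using hi)]
  simp

theorem map_getD_lt {α β : Type} (xs : List α) (f : α → β) (i : Nat) (h : i < xs.length) (d : β) :
    (xs.map f).getD i d = f xs[i] := by
  rw [List.getD_eq_getElem _ _ (by simpa using h)]
  simp


-- ----- sum-form helpers (proof-only) -----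

def tblRowl (grid : List (List Int)) : List (List Int) := grid.map (fun row => scanGo 0 row)
def tblRowr (C : Int) (grid : List (List Int)) : List (List Int) :=
  grid.map (fun row => (scanGo 0 (row.take C.toNat).reverse).reverse)
def tblColl (R C : Int) (grid : List (List Int)) : List (List Int) :=
  (List.range C.toNat).map (fun c => scanGo 0 (colList R.toNat grid c))
def tblColr (R C : Int) (grid : List (List Int)) : List (List Int) :=
  (List.range C.toNat).map (fun c => (scanGo 0 (colList R.toNat grid c).reverse).reverse)

def cellA (R C : Int) (grid : List (List Int)) (p : Int × List Int) (q : Int × Int) : Int :=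
  if q.2 ≠ 1 then 0
  else
    get_l (PySem.List.pyGetD (PySem.List.pyGetD (tblRowl grid) p.1 []) q.1 0)
          (PySem.List.pyGetD (PySem.List.pyGetD (tblColl R C grid) q.1 []) p.1 0)
    + get_l (PySem.List.pyGetD (PySem.List.pyGetD (tblRowr C grid) p.1 []) q.1 0)
          (PySem.List.pyGetD (PySem.List.pyGetD (tblColl R C grid) q.1 []) p.1 0)
    + get_l (PySem.List.pyGetD (PySem.List.pyGetD (tblRowr C grid) p.1 []) q.1 0)
          (PySem.List.pyGetD (PySem.List.pyGetD (tblColr R C grid) q.1 []) p.1 0)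
    + get_l (PySem.List.pyGetD (PySem.List.pyGetD (tblRowl grid) p.1 []) q.1 0)
          (PySem.List.pyGetD (PySem.List.pyGetD (tblColr R C grid) q.1 []) p.1 0)

def cellB (R C : Int) (grid : List (List Int)) (ri ci : Int) : Int :=
  if PySem.List.pyGetD (PySem.List.pyGetD grid ri []) ci 0 ≠ 1 then 0
  else
    get_l (armLeftNat (PySem.List.pyGetD grid ri []) ci.toNat) (armUpNat grid ci.toNat ri.toNat)
    + get_l (armRightGo (PySem.List.pyGetD grid ri []) (C - ci).toNat ci.toNat)
        (armUpNat grid ci.toNat ri.toNat)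
    + get_l (armRightGo (PySem.List.pyGetD grid ri []) (C - ci).toNat ci.toNat)
        (armDownGo grid ci.toNat (R - ri).toNat ri.toNat)
    + get_l (armLeftNat (PySem.List.pyGetD grid ri []) ci.toNat)
        (armDownGo grid ci.toNat (R - ri).toNat ri.toNat)

def cA (R C : Int) (grid : List (List Int)) (i j : Nat) : Int :=
  cellA R C grid ((i : Int), grid.getD i []) ((j : Int), (grid.getD i []).getD j 0)
def cB (R C : Int) (grid : List (List Int)) (i j : Nat) : Int :=
  cellB R C grid (i : Int) (j : Int)

theorem foldl_body_sum {α : Type} (l : List α) (g : α → Int) (body : Int → α → Int)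
    (h : ∀ (acc : Int), ∀ x ∈ l, body acc x = acc + g x) (init : Int) :
    l.foldl body init = init + (l.map g).sum := by
  rw [PySem.List.foldl_congr_mem l body (fun acc x => acc + g x) init h, PySem.List.foldl_add]

theorem solveA_eq (R C : Int) (grid : List (List Int)) :
    solve R C grid
      = ((PySem.List.enumerate grid).map
          (fun p => ((PySem.List.enumerate p.2).map (cellA R C grid p)).sum)).sum := by
  simp only [solve]
  refine Eq.trans (foldl_body_sum _ _ _ ?_ 0) (zero_add _)
  intro acc p _
  refine foldl_body_sum _ _ _ ?_ acc
  intro acc2 q _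
  simp only [cellA, tblRowl, tblRowr, tblColl, tblColr]
  by_cases h2 : q.2 = 1
  · rw [if_neg (by simpa using h2), if_neg (by simpa using h2)]; ring
  · rw [if_pos (by simpa using h2), if_pos (by simpa using h2)]; ring

theorem solveB_eq (R C : Int) (grid : List (List Int)) :
    solve_alt R C grid
      = ((PySem.List.pyRange 0 R 1).map
          (fun ri => ((PySem.List.pyRange 0 C 1).map (cellB R C grid ri)).sum)).sum := by
  simp only [solve_alt]
  refine Eq.trans (foldl_body_sum _ _ _ ?_ 0) (zero_add _)
  intro acc ri _
  refine foldl_body_sum _ _ _ ?_ acc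
  intro acc2 ci _
  simp only [cellB]
  by_cases h2 : PySem.List.pyGetD (PySem.List.pyGetD grid ri []) ci 0 = 1
  · rw [if_neg (by simpa using h2), if_neg (by simpa using h2)]; ring
  · rw [if_pos (by simpa using h2), if_pos (by simpa using h2)]; ring

theorem sum_map_pyRange_zero (n : Int) (f : Int → Int) :
    ((PySem.List.pyRange 0 n 1).map f).sum
      = ((List.range n.toNat).map (fun k : Nat => f (k : Int))).sum := by
  rw [PySem.List.pyRange_one, List.map_map]
  simp only [Function.comp_def, zero_add, sub_zero]

theorem sum_map_enum {α : Type} (xs : List α) (d : α) (H : Int × α → Int) :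
    ((PySem.List.enumerate xs).map H).sum
      = ((List.range xs.length).map (fun i : Nat => H ((i : Int), xs.getD i d))).sum := by
  rw [PySem.List.enumerate_eq_map_pyRange xs d, List.map_map, PySem.List.pyRange_one, List.map_map]
  simp only [Function.comp_def, zero_add, sub_zero, PySem.List.len, Int.toNat_natCast,
    PySem.List.pyGetD_natCast]

theorem sum_map_range_congr (n : Nat) (f g : Nat → Int) (h : ∀ i, i < n → f i = g i) :
    ((List.range n).map f).sum = ((List.range n).map g).sum := by
  rw [List.map_congr_left (fun i hi => h i (List.mem_range.mp hi))]

theorem sum_map_range_ext (f : Nat → Int) (n m : Nat) (hnm : n ≤ m)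
    (h0 : ∀ i, n ≤ i → i < m → f i = 0) :
    ((List.range m).map f).sum = ((List.range n).map f).sum := by
  induction m with
  | zero =>
      have h : n = 0 := by omega
      rw [h]
  | succ m ih =>
      by_cases hm : n = m + 1
      · rw [hm]
      · have hrec := ih (by omega) (fun i h1 h2 => h0 i h1 (by omega))
        rw [List.range_succ, List.map_append, List.sum_append]
        simp [h0 m (by omega) (by omega)]
        exact hrec

theorem one_window (R C : Int) (grid : List (List Int))
    (hc : ∀ p ∈ PySem.List.enumerate grid, ∀ q ∈ PySem.List.enumerate p.2,
      q.2 = 1 → p.1 < R ∧ q.1 < C)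
    (i j : Nat) (hi : i < grid.length) (hj : j < (grid.getD i []).length)
    (h1 : (grid.getD i []).getD j 0 = 1) : (i : Int) < R ∧ (j : Int) < C := by
  have hg : grid.getD i [] = grid[i] := List.getD_eq_getElem _ _ hi
  have hj' : j < grid[i].length := by rwa [hg] at hj
  have h1' : grid[i][j] = 1 := by
    rw [hg] at h1; rwa [List.getD_eq_getElem _ _ hj'] at h1
  have hp : ((0 : Int) + (i : Int), grid[i]) ∈ PySem.List.enumerate grid := by
    rw [PySem.List.mem_enumerate_iff]; exact ⟨i, hi, rfl⟩
  have hq : ((0 : Int) + (j : Int), grid[i][j]) ∈ PySem.List.enumerate grid[i] := by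
    rw [PySem.List.mem_enumerate_iff]; exact ⟨j, hj', rfl⟩
  have := hc _ hp _ hq h1'
  simpa using this

theorem cA_zero (R C : Int) (grid : List (List Int)) (i j : Nat)
    (h : (grid.getD i []).getD j 0 ≠ 1) : cA R C grid i j = 0 := by
  simp only [cA, cellA]
  rw [if_pos h]

theorem cB_zero (R C : Int) (grid : List (List Int)) (i j : Nat)
    (h : (grid.getD i []).getD j 0 ≠ 1) : cB R C grid i j = 0 := by
  simp only [cB, cellB, PySem.List.pyGetD_natCast]
  rw [if_pos h]

theorem cell_core (R C : Int) (grid : List (List Int))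
    (ha : 0 < C → ∀ row ∈ grid, C ≤ (row.length : Int))
    (hb : 0 < R → 0 < C → R ≤ (grid.length : Int))
    (i j : Nat) (hiN : i < grid.length) (hjL : j < (grid.getD i []).length)
    (hiR : i < R.toNat) (hjC : j < C.toNat) :
    cA R C grid i j = cB R C grid i j := by
  by_cases h1 : (grid.getD i []).getD j 0 = 1
  · have hg : grid.getD i [] = grid[i] := List.getD_eq_getElem _ _ hiN
    have hjL' : j < grid[i].length := by rwa [hg] at hjL
    have h1' : grid[i][j] = 1 := by
      rw [hg] at h1; rwa [List.getD_eq_getElem _ _ hjL'] at h1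
    have hrowmem : grid[i] ∈ grid := List.getElem_mem hiN
    have hiR' : (i : Int) < R := by omega
    have hjC' : (j : Int) < C := by omega
    have hC0 : 0 < C := by omega
    have hR0 : 0 < R := by omega
    have hRN : R ≤ (grid.length : Int) := hb hR0 hC0
    have hCrow : C ≤ (grid[i].length : Int) := ha hC0 _ hrowmem
    have htk : (grid[i].take C.toNat).length = C.toNat := by simp; omega
    have hcl : (colList R.toNat grid j).length = R.toNat := by simp [colList]; omega
    have hval : grid[i].getD j 0 = 1 := by
      rw [List.getD_eq_getElem _ _ hjL']; exact h1'
    simp only [cA, cB, cellA, cellB, tblRowl, tblRowr, tblColl, tblColr,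
      PySem.List.pyGetD_natCast, Int.toNat_natCast, hg]
    rw [if_neg (not_not_intro hval), if_neg (not_not_intro hval)]
    have h_rl : ((grid.map (fun row => scanGo 0 row)).getD i []).getD j 0
        = (if armLeftNat grid[i] j > 1 then armLeftNat grid[i] j else 0) := by
      rw [map_getD_lt _ _ _ hiN, scanGo_getD, armLeftNat_eq_runAux]
    have h_rr : ((grid.map (fun row => (scanGo 0 (row.take C.toNat).reverse).reverse)).getD i []).getD j 0
        = (if armRightGo grid[i] ((C - (j : Int)).toNat) j > 1
            then armRightGo grid[i] ((C - (j : Int)).toNat) j else 0) := by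
      have e1 : armRightGo grid[i] ((C - (j : Int)).toNat) j
          = armLeftNat (grid[i].take C.toNat).reverse (C.toNat - 1 - j) := by
        rw [show (C - (j : Int)).toNat = C.toNat - j from by omega,
          ← armRightGo_take grid[i] C.toNat _ _ (by omega),
          show C.toNat - j = (grid[i].take C.toNat).length - j from by rw [htk],
          armRightGo_eq _ j (by rw [htk]; exact hjC), htk]
      rw [map_getD_lt _ _ _ hiN]
      have hlen : (scanGo 0 (grid[i].take C.toNat).reverse).length = C.toNat := by
        rw [scanGo_length, List.length_reverse, htk]
      rw [reverse_getD_of_lt (by rw [hlen]; exact hjC), hlen, scanGo_getD, e1,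
        armLeftNat_eq_runAux]
    have h_cl : (((List.range C.toNat).map (fun c => scanGo 0 (colList R.toNat grid c))).getD j []).getD i 0
        = (if armUpNat grid j i > 1 then armUpNat grid j i else 0) := by
      rw [range_map_getD _ _ _ hjC, scanGo_getD, armUpNat_take R.toNat grid j i hiR,
        armLeftNat_eq_runAux]
    have h_cr : (((List.range C.toNat).map (fun c => (scanGo 0 (colList R.toNat grid c).reverse).reverse)).getD j []).getD i 0
        = (if armDownGo grid j ((R - (i : Int)).toNat) i > 1
            then armDownGo grid j ((R - (i : Int)).toNat) i else 0) := by
      have e1 : armDownGo grid j ((R - (i : Int)).toNat) i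
          = armLeftNat (colList R.toNat grid j).reverse (R.toNat - 1 - i) := by
        rw [show (R - (i : Int)).toNat = R.toNat - i from by omega,
          armDownGo_take R.toNat grid j _ _ (by omega),
          show R.toNat - i = (colList R.toNat grid j).length - i from by rw [hcl],
          armRightGo_eq _ i (by rw [hcl]; exact hiR), hcl]
      rw [range_map_getD _ _ _ hjC]
      have hlen : (scanGo 0 (colList R.toNat grid j).reverse).length = R.toNat := by
        rw [scanGo_length, List.length_reverse, hcl]
      rw [reverse_getD_of_lt (by rw [hlen]; exact hiR), hlen, scanGo_getD, e1,
        armLeftNat_eq_runAux]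
    rw [h_rl, h_rr, h_cl, h_cr, get_l_trunc_left, get_l_trunc_left, get_l_trunc_left,
      get_l_trunc_left, get_l_trunc_right, get_l_trunc_right, get_l_trunc_right,
      get_l_trunc_right]
  · rw [cA_zero _ _ _ _ _ h1, cB_zero _ _ _ _ _ h1]

theorem solve_spec : Claim_equal_solve := by
  intro R C grid _ hpre
  obtain ⟨ha, hb, hc⟩ := hpre
  unfold Spec_solve
  rw [solveA_eq, solveB_eq, sum_map_enum grid ([] : List Int), sum_map_pyRange_zero R]
  -- inner sums into range form
  rw [sum_map_range_congr grid.length _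
        (fun i => ((List.range (grid.getD i []).length).map (cA R C grid i)).sum)
        (fun i _ => by rw [sum_map_enum (grid.getD i []) 0]; rfl),
      sum_map_range_congr R.toNat _
        (fun k => ((List.range C.toNat).map (cB R C grid k)).sum)
        (fun k _ => by rw [sum_map_pyRange_zero C]; rfl)]
  -- both sides down to sums over min grid.length R.toNat
  have hAext : ((List.range grid.length).map
        (fun i => ((List.range (grid.getD i []).length).map (cA R C grid i)).sum)).sum
      = ((List.range (min grid.length R.toNat)).map
        (fun i => ((List.range (grid.getD i []).length).map (cA R C grid i)).sum)).sum := by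
    refine sum_map_range_ext _ _ _ (by omega) ?_
    intro i hmin hiN
    have hz : ∀ j, j < (grid.getD i []).length → cA R C grid i j = 0 := by
      intro j hj
      by_cases h1 : (grid.getD i []).getD j 0 = 1
      · exact absurd ((one_window R C grid hc i j hiN hj h1).1) (by omega)
      · exact cA_zero _ _ _ _ _ h1
    rw [sum_map_range_congr _ _ (fun _ => 0) (fun j hj => hz j hj)]
    simp
  have hBext : ((List.range R.toNat).map
        (fun k => ((List.range C.toNat).map (cB R C grid k)).sum)).sum
      = ((List.range (min grid.length R.toNat)).map
        (fun k => ((List.range C.toNat).map (cB R C grid k)).sum)).sum := by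
    refine sum_map_range_ext _ _ _ (by omega) ?_
    intro i hmin hiR
    have hrow : grid.getD i [] = [] := List.getD_eq_default _ _ (by omega)
    have hz : ∀ j, j < C.toNat → cB R C grid i j = 0 := by
      intro j _
      refine cB_zero _ _ _ _ _ ?_
      rw [hrow]
      simp
    rw [sum_map_range_congr _ _ (fun _ => 0) (fun j hj => hz j hj)]
    simp
  rw [hAext, hBext]
  refine sum_map_range_congr _ _ _ ?_
  intro i hiM
  have hiN : i < grid.length := by omega
  have hiR : i < R.toNat := by omega
  have hAin : ((List.range (grid.getD i []).length).map (cA R C grid i)).sum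
      = ((List.range (min (grid.getD i []).length C.toNat)).map (cA R C grid i)).sum := by
    refine sum_map_range_ext _ _ _ (by omega) ?_
    intro j hmin hjL
    by_cases h1 : (grid.getD i []).getD j 0 = 1
    · exact absurd ((one_window R C grid hc i j hiN hjL h1).2) (by omega)
    · exact cA_zero _ _ _ _ _ h1
  have hBin : ((List.range C.toNat).map (cB R C grid i)).sum
      = ((List.range (min (grid.getD i []).length C.toNat)).map (cB R C grid i)).sum := by
    refine sum_map_range_ext _ _ _ (by omega) ?_
    intro j hmin hjC
    refine cB_zero _ _ _ _ _ ?_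
    rw [List.getD_eq_default _ _ (by omega)]
    simp
  rw [hAin, hBin]
  exact sum_map_range_congr _ _ _
    (fun j hj => cell_core R C grid ha hb i j hiN (by omega) hiR (by omega))
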